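-- pv_equiv track=rewrite | github.com/wangzheng15534-blip/FastCode | fastcode/projection_transform.py | _hierarchy_parent_links
-- ===== SOURCE A (Python) =====
-- def _hierarchy_parent_links(
--     hierarchy_levels: dict[int, dict[str, set[str]]], selected_level: int
-- ) -> list[tuple[str, str, int]]:
--     if (selected_level + 1) not in hierarchy_levels:
--         return []
--     parent_level = hierarchy_levels[selected_level]
--     child_level = hierarchy_levels[selected_level + 1]
--     parent_links: list[tuple[str, str, int]] = []
--     for child_id, child_members in child_level.items():
--         parent_id = None
--         for pid, pmembers in parent_level.items():
--             if child_members.issubset(pmembers):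
--                 parent_id = pid
--                 break
--         if parent_id:
--             parent_links.append((child_id, parent_id, selected_level + 1))
--     return parent_links
-- ===== SOURCE B (Python) =====
-- def _hierarchy_parent_links(
--     hierarchy_levels: dict[int, dict[str, set[str]]], selected_level: int
-- ) -> list[tuple[str, str, int]]:
--     child_level = hierarchy_levels.get(selected_level + 1)
--     if child_level is None:
--         return []
--     parents = hierarchy_levels[selected_level]
--     # Inverted index: member element -> parent items (in insertion order) containing it.
--     by_member: dict[str, list[tuple[str, set[str]]]] = {}
--     for item in parents.items():
--         for m in item[1]:
--             by_member.setdefault(m, []).append(item)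
--     # an empty child set matches the first parent, so its candidate list is just that
--     default = list(parents.items())[:1]
--     links: list[tuple[str, str, int]] = []
--     for cid, members in child_level.items():
--         # a superset parent must contain every member, so only the parents
--         # indexed under one of them can match
--         cands = by_member.get(next(iter(members)), []) if members else default
--         pid = next((p for p, pm in cands if members <= pm), None)
--         if pid:
--             links.append((cid, pid, selected_level + 1))
--     return links
-- ===== Notes on version B (the rewrite author's own statement) =====
-- stated objective: alternative
-- what changed: B builds an inverted index from member element to the parents containing it (in insertion order), so each child only scans the parents sharing its first member instead of every parent; empty child sets fall back to the first parent directly.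
import Mathlib
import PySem

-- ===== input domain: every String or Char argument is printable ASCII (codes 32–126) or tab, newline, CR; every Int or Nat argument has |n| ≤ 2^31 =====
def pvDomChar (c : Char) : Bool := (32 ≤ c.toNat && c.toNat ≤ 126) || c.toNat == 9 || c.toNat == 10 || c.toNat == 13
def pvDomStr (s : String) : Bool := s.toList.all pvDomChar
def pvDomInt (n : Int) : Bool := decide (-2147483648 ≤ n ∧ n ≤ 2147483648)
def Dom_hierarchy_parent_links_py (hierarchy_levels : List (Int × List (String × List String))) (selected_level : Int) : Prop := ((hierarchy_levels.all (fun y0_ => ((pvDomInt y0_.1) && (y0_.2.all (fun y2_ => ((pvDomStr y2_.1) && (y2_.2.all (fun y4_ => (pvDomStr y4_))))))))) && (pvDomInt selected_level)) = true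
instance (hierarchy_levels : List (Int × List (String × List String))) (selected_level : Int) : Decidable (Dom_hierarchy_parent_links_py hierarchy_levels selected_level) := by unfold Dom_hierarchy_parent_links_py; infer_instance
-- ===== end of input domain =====

-- B replaces A's scan of every parent per child by an inverted index member → containing parents,
-- so each child only scans the parents that share its first member (objective: alternative).

-- ===== PORT A =====
-- the inner 'for pid, pmembers … if issubset: break' loop of A (also B's scan over its candidate list)
def firstSuperset (parents : List (String × List String)) (cm : List String) : Option String :=
  match parents with
  | [] => none
  | (pid, pm) :: rest =>
    if PySem.Set.issubset (PySem.Set.ofList cm) pm then some pid else firstSuperset rest cm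

def hierarchy_parent_links_py (hierarchy_levels : List (Int × List (String × List String))) (selected_level : Int) : List (String × String × Int) :=
  let d := PySem.Dict.ofList hierarchy_levels
  if ¬ (d.contains (selected_level + 1)) then []
  else
    let parent_level := PySem.Dict.ofList (d.getD selected_level [])   -- KeyError when sl ∉ d: excluded by Pre_
    let child_level := PySem.Dict.ofList (d.getD (selected_level + 1) [])
    child_level.items.foldl (fun acc c =>
      match firstSuperset parent_level.items c.2 with
      | some pid => if pid ≠ "" then acc ++ [(c.1, pid, selected_level + 1)] else acc   -- 'if parent_id:' — "" is falsy
      | none => acc) []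

-- ===== PORT B =====
def hierarchy_parent_links_py_alt (hierarchy_levels : List (Int × List (String × List String))) (selected_level : Int) : List (String × String × Int) :=
  let d := PySem.Dict.ofList hierarchy_levels
  match d.get? (selected_level + 1) with
  | none => []
  | some child_list =>
    let parents := PySem.Dict.ofList (d.getD selected_level [])
    -- by_member.setdefault(m, []).append(item); the per-key lists are in parent order,
    -- so the member iteration order of the Python set does not affect them
    let by_member : PySem.Dict String (List (String × List String)) :=
      parents.items.foldl (fun ix item =>
        item.2.foldl (fun ix m => ix.modify m [] (fun l => l ++ [item])) ix) PySem.Dict.empty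
    let dflt := parents.items.take 1
    (PySem.Dict.ofList child_list).items.foldl (fun acc c =>
      -- 'next(iter(members))' ported as the head of the member list: B's result is the
      -- same for every choice of member (proved by the spec theorem), so this is exact
      let cands := if c.2 ≠ [] then
          (match c.2.head? with | some m => by_member.getD m [] | none => [])
        else dflt
      -- 'next((p for p, pm in cands if members <= pm), None)' is the firstSuperset scan
      match firstSuperset cands c.2 with
      | some pid => if pid ≠ "" then acc ++ [(c.1, pid, selected_level + 1)] else acc   -- 'if pid:'
      | none => acc) []

-- ===== PRECONDITION & SPEC =====
-- Pre_ excludes exactly the inputs where Python A raises KeyError: the child level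
-- selected_level+1 exists but the parent level selected_level does not.
def Pre_hierarchy_parent_links_py (hierarchy_levels : List (Int × List (String × List String))) (selected_level : Int) : Prop :=
  (PySem.Dict.ofList hierarchy_levels).contains (selected_level + 1) = true →
    (PySem.Dict.ofList hierarchy_levels).contains selected_level = true
instance (hierarchy_levels : List (Int × List (String × List String))) (selected_level : Int) : Decidable (Pre_hierarchy_parent_links_py hierarchy_levels selected_level) := by unfold Pre_hierarchy_parent_links_py; infer_instance

def pvWitness_hierarchy_parent_links_py : (List (Int × List (String × List String))) × Int :=
  ([(0, [("p", ["a", "b"]), ("q", ["c"])]), (1, [("x", ["a"]), ("y", ["c"]), ("z", ["d"])])], 0)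

def Spec_hierarchy_parent_links_py (hierarchy_levels : List (Int × List (String × List String))) (selected_level : Int) (out : List (String × String × Int)) : Prop := out = hierarchy_parent_links_py_alt hierarchy_levels selected_level
instance (hierarchy_levels : List (Int × List (String × List String))) (selected_level : Int) (out : List (String × String × Int)) : Decidable (Spec_hierarchy_parent_links_py hierarchy_levels selected_level out) := by unfold Spec_hierarchy_parent_links_py; infer_instance

-- ===== CLAIM (what is proved, stated in full; the proofs are below) =====
def Claim_equal_hierarchy_parent_links_py : Prop := ∀ (hierarchy_levels : List (Int × List (String × List String))) (selected_level : Int), Dom_hierarchy_parent_links_py hierarchy_levels selected_level → Pre_hierarchy_parent_links_py hierarchy_levels selected_level → Spec_hierarchy_parent_links_py hierarchy_levels selected_level (hierarchy_parent_links_py hierarchy_levels selected_level)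

-- ===== LEMMAS AND PROOFS =====

-- the inner 'for m in pmembers: index.setdefault(m,[]).append(p)' loop: what key m holds afterwards
lemma getD_inner_fold (p : String × List String) (m : String) :
    ∀ (ms : List String) (ix : PySem.Dict String (List (String × List String))),
      (ms.foldl (fun ix m' => ix.modify m' [] (fun l => l ++ [p])) ix).getD m []
        = ix.getD m [] ++ List.replicate (ms.count m) p := by
  intro ms
  induction ms with
  | nil => intro ix; simp
  | cons m' rest ih =>
    intro ix
    by_cases h : m' = m
    · subst h
      simp [List.foldl_cons, ih, PySem.Dict.getD_modify_self,
        List.replicate_succ, List.append_assoc]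
    · simp [List.foldl_cons, ih, PySem.Dict.getD_modify_of_ne _ _ _ (Ne.symm h), h]

-- the whole index build: key m holds every parent, repeated count-many times, in parent order
lemma getD_index (m : String) :
    ∀ (ps : List (String × List String)) (ix : PySem.Dict String (List (String × List String))),
      (ps.foldl (fun ix p => p.2.foldl (fun ix m' => ix.modify m' [] (fun l => l ++ [p])) ix) ix).getD m []
        = ix.getD m [] ++ ps.flatMap (fun p => List.replicate (p.2.count m) p) := by
  intro ps
  induction ps with
  | nil => intro ix; simp
  | cons p rest ih =>
    intro ix
    simp [List.foldl_cons, ih, getD_inner_fold, List.append_assoc]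

lemma firstSuperset_replicate_append (p : String × List String) (cm : List String)
    (h : PySem.Set.issubset (PySem.Set.ofList cm) p.2 = false) :
    ∀ (k : Nat) (xs : List (String × List String)),
      firstSuperset (List.replicate k p ++ xs) cm = firstSuperset xs cm := by
  intro k
  induction k with
  | zero => intro xs; simp
  | succ n ih => intro xs; simp [List.replicate_succ, firstSuperset, h, ih]

-- scanning only the parents that contain a member m of cm finds the same first superset
lemma firstSuperset_index (cm : List String) (m : String) (hm : m ∈ cm) :
    ∀ (ps : List (String × List String)),
      firstSuperset (ps.flatMap (fun p => List.replicate (p.2.count m) p)) cm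
        = firstSuperset ps cm := by
  intro ps
  induction ps with
  | nil => rfl
  | cons p rest ih =>
    by_cases h : PySem.Set.issubset (PySem.Set.ofList cm) p.2 = true
    · have hmem : m ∈ p.2 := by
        have := (PySem.Set.issubset_iff _ _).mp h
        exact this m ((PySem.Set.mem_ofList _ _).mpr hm)
      have hc : 0 < p.2.count m := List.count_pos_iff.mpr hmem
      obtain ⟨n, hn⟩ : ∃ n, p.2.count m = n + 1 := ⟨p.2.count m - 1, by omega⟩
      simp [List.flatMap_cons, hn, List.replicate_succ, firstSuperset, h]
    · have h' : PySem.Set.issubset (PySem.Set.ofList cm) p.2 = false := by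
        rw [← Bool.not_eq_true]; exact h
      simp only [List.flatMap_cons]
      rw [firstSuperset_replicate_append p cm h', ih]
      simp [firstSuperset, h']

-- empty child set: the first parent (if any) is the match
lemma firstSuperset_nil (ps : List (String × List String)) :
    firstSuperset ps [] = ps.head?.map (·.1) := by
  cases ps with
  | nil => rfl
  | cons p rest => simp [firstSuperset, PySem.Set.issubset]

-- B's per-child candidate list yields the same first superset as A's scan of all parents
lemma parent_id_eq (ps : List (String × List String)) (cm : List String) :
    firstSuperset
      (if cm ≠ [] then
          (match cm.head? with
           | some m => (ps.foldl (fun ix item =>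
               item.2.foldl (fun ix m' => ix.modify m' [] (fun l => l ++ [item])) ix)
               PySem.Dict.empty).getD m []
           | none => [])
        else ps.take 1) cm
      = firstSuperset ps cm := by
  cases cm with
  | nil =>
    simp only [ne_eq, not_true_eq_false, if_false]
    cases ps with
    | nil => rfl
    | cons p rest => simp [firstSuperset, PySem.Set.issubset, firstSuperset_nil]
  | cons m rest =>
    have hm : m ∈ m :: rest := List.mem_cons_self
    simp only [ne_eq, reduceCtorEq, not_false_eq_true, if_true, List.head?_cons]
    rw [getD_index]
    simpa using firstSuperset_index (m :: rest) m hm ps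

-- ===== VERDICT (by name: the statement is the Claim_ definition above) =====
theorem hierarchy_parent_links_py_spec : Claim_equal_hierarchy_parent_links_py := by
  intro hl sl _ _
  unfold Spec_hierarchy_parent_links_py hierarchy_parent_links_py hierarchy_parent_links_py_alt
  dsimp only []
  cases hv : (PySem.Dict.ofList hl).get? (sl + 1) with
  | none =>
    have h : (PySem.Dict.ofList hl).contains (sl + 1) = false := by
      rw [PySem.Dict.contains_eq_isSome_get?, hv]; rfl
    simp [h]
  | some v =>
    have h : (PySem.Dict.ofList hl).contains (sl + 1) = true := by
      rw [PySem.Dict.contains_eq_isSome_get?, hv]; rfl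
    have hgd : (PySem.Dict.ofList hl).getD (sl + 1) [] = v := by
      rw [PySem.Dict.getD_eq_get?_getD, hv]; rfl
    rw [hgd, if_neg (by simp [h])]
    apply PySem.List.foldl_congr_mem
    intro acc c _
    rw [parent_id_eq]
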